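-- pv_equiv track=rewrite | github.com/sophgo/tpu-mlir | python/PerfAI/PerfAI.web/utils/js_prep.py | deduplicate_ordered_list
-- ===== SOURCE A (Python) =====
-- def deduplicate_ordered_list(lst):
--     seen = set()
--     deduped = []
--     for item in sorted(lst, key=lambda x: x[0]):
--         t_item = tuple(item)
--         if t_item not in seen:
--             seen.add(t_item)
--             deduped.append(item)
--     return deduped
-- ===== SOURCE B (Python) =====
-- def deduplicate_ordered_list(lst):
--     # Dedupe first (dict insertion order keeps the first occurrence; equal
--     # tuples overwrite with an equal item), then stable-sort by first element.
--     uniq = {tuple(item): item for item in lst}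
--     return sorted(uniq.values(), key=lambda x: x[0])
-- ===== Notes on version B (the rewrite author's own statement) =====
-- stated objective: idiomatic
-- what changed: B dedupes before sorting via a dict comprehension keyed by tuple(item) (insertion order keeps first occurrences, no explicit seen-set/branch), then sorts the unique values; A sorts everything first and dedupes with a seen-set loop.
import Mathlib
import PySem

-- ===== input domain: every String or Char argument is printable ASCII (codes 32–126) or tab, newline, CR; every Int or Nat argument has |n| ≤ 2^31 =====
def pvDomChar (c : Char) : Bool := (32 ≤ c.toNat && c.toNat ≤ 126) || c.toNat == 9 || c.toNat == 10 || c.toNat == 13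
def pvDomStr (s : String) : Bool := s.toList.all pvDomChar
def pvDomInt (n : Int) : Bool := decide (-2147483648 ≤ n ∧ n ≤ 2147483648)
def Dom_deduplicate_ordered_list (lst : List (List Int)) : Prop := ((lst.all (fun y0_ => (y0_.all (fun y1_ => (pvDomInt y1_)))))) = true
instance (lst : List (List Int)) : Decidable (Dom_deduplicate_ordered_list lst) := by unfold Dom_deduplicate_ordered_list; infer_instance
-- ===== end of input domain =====

-- B dedupes first via a dict keyed by the item (insertion order keeps first occurrences),
-- then stable-sorts the unique values by their first element; A sorts first, then dedupes
-- with a seen-set loop. Equal values on every list whose items are all nonempty.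


-- ===== PORT A =====
-- the sort key 'lambda x: x[0]'; exact for nonempty x (Pre_ requires every item nonempty)
def pvKey (x : List Int) : Int := PySem.List.pyGetD x 0 0

def deduplicate_ordered_list (lst : List (List Int)) : List (List Int) :=
  -- seen = set(); deduped = []
  -- for item in sorted(lst, key=lambda x: x[0]): if tuple(item) not in seen: add, append
  ((PySem.List.sorted lst pvKey).foldl
    (fun (st : PySem.Set (List Int) × List (List Int)) item =>
      if st.1.contains item then st else (st.1.add item, st.2 ++ [item]))
    (PySem.Set.empty, [])).2

-- ===== PORT B =====
def deduplicate_ordered_list_alt (lst : List (List Int)) : List (List Int) :=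
  -- uniq = {tuple(item): item for item in lst}; return sorted(uniq.values(), key=lambda x: x[0])
  PySem.List.sorted
    (PySem.Dict.values (lst.foldl (fun d item => d.insert item item) PySem.Dict.empty))
    pvKey

-- ===== PRECONDITION & SPEC =====
-- Pre_ excludes lists containing an empty item, on which both Pythons raise IndexError ('x[0]' in the sort key).
def Pre_deduplicate_ordered_list (lst : List (List Int)) : Prop := ∀ x ∈ lst, x ≠ []
instance (lst : List (List Int)) : Decidable (Pre_deduplicate_ordered_list lst) := by unfold Pre_deduplicate_ordered_list; infer_instance

def pvWitness_deduplicate_ordered_list : List (List Int) := [[2, 5], [1], [2, 5], [1, 3]]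

def Spec_deduplicate_ordered_list (lst : List (List Int)) (out : List (List Int)) : Prop := out = deduplicate_ordered_list_alt lst
instance (lst : List (List Int)) (out : List (List Int)) : Decidable (Spec_deduplicate_ordered_list lst out) := by unfold Spec_deduplicate_ordered_list; infer_instance

-- ===== CLAIM (what is proved, stated in full; the proofs are below) =====
def Claim_equal_deduplicate_ordered_list : Prop := ∀ (lst : List (List Int)), Dom_deduplicate_ordered_list lst → Pre_deduplicate_ordered_list lst → Spec_deduplicate_ordered_list lst (deduplicate_ordered_list lst)

-- ===== LEMMAS AND PROOFS =====

-- first-occurrence dedup of l, skipping elements already in seen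
def firstOcc {α : Type} [DecidableEq α] (seen : List α) : List α → List α
  | [] => []
  | x :: xs => if x ∈ seen then firstOcc seen xs else x :: firstOcc (x :: seen) xs

theorem firstOcc_congr {α : Type} [DecidableEq α] (l : List α) :
    ∀ s₁ s₂ : List α, (∀ y ∈ l, (y ∈ s₁ ↔ y ∈ s₂)) → firstOcc s₁ l = firstOcc s₂ l := by
  induction l with
  | nil => intro _ _ _; rfl
  | cons x xs ih =>
    intro s₁ s₂ h
    simp only [firstOcc]
    have hx := h x (by simp)
    by_cases hmem : x ∈ s₁
    · rw [if_pos hmem, if_pos (hx.mp hmem)]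
      exact ih _ _ (fun y hy => h y (by simp [hy]))
    · rw [if_neg hmem, if_neg (fun hc => hmem (hx.mpr hc))]
      refine congrArg _ (ih _ _ (fun y hy => ?_))
      simp only [List.mem_cons]
      exact or_congr Iff.rfl (h y (by simp [hy]))

theorem mem_firstOcc {α : Type} [DecidableEq α] (l : List α) :
    ∀ (s : List α) (y : α), y ∈ firstOcc s l → y ∈ l := by
  induction l with
  | nil => intro _ _ h; exact absurd h (by simp [firstOcc])
  | cons x xs ih =>
    intro s y h
    simp only [firstOcc] at h
    by_cases hmem : x ∈ s
    · rw [if_pos hmem] at h; exact .tail _ (ih _ _ h)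
    · rw [if_neg hmem] at h
      rcases List.mem_cons.mp h with h | h
      · simp [h]
      · exact .tail _ (ih _ _ h)

theorem firstOcc_append {α : Type} [DecidableEq α] (P : List α) :
    ∀ (T s : List α), firstOcc s (P ++ T) = firstOcc s P ++ firstOcc (P ++ s) T := by
  induction P with
  | nil => intro T s; rfl
  | cons p P ih =>
    intro T s
    simp only [List.cons_append, firstOcc]
    by_cases hmem : p ∈ s
    · rw [if_pos hmem, if_pos hmem, ih]
      refine congrArg _ (firstOcc_congr _ _ _ (fun y _ => ?_))
      simp only [List.mem_cons, List.mem_append]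
      constructor
      · rintro (h | h) <;> simp [h]
      · rintro (rfl | h | h) <;> simp [*]
    · rw [if_neg hmem, if_neg hmem, ih]
      simp only [List.cons_append]
      refine congrArg _ (congrArg _ (firstOcc_congr _ _ _ (fun y _ => ?_)))
      simp only [List.mem_cons, List.mem_append]
      tauto

-- PySem.List.insertBy splits the list at the first element 'before' x
theorem insertBy_eq_takeWhile {α : Type} (before : α → α → Bool) (x : α) (l : List α) :
    PySem.List.insertBy before x l =
      l.takeWhile (fun y => ! before x y) ++ x :: l.dropWhile (fun y => ! before x y) := by
  induction l with
  | nil => rfl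
  | cons y ys ih =>
    simp only [PySem.List.insertBy, List.takeWhile, List.dropWhile]
    by_cases h : before x y
    · simp [h]
    · simp only [Bool.not_eq_true] at h
      simp [h, ih]

theorem insertBy_middle {α : Type} (before : α → α → Bool) (x : α) :
    ∀ (A B : List α), (∀ y ∈ A, before x y = false) → (∀ y ∈ B, before x y = true) →
      PySem.List.insertBy before x (A ++ B) = A ++ x :: B := by
  intro A
  induction A with
  | nil =>
    intro B _ hB
    cases B with
    | nil => rfl
    | cons b B' => simp [PySem.List.insertBy, hB b (by simp)]
  | cons a A' ih =>
    intro B hA hB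
    have ha : before x a = false := hA a (by simp)
    simp only [List.cons_append, PySem.List.insertBy, ha]
    simp only [Bool.false_eq_true, if_false, List.cons.injEq, true_and]
    exact ih B (fun y hy => hA y (by simp [hy])) hB

-- snoc step of the insertion sort
theorem sorted_snoc {α : Type} (xs : List α) (x : α) (key : α → Int) :
    PySem.List.sorted (xs ++ [x]) key =
      PySem.List.insertBy (fun a b => decide (key a < key b)) x (PySem.List.sorted xs key) := by
  rw [PySem.List.sorted_eq_foldl_insertBy, PySem.List.sorted_eq_foldl_insertBy, List.foldl_append]
  rfl

-- stable sort commutes with first-occurrence dedup (duplicates have equal keys)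
theorem firstOcc_sorted_comm (key : List Int → Int) (xs : List (List Int)) :
    firstOcc [] (PySem.List.sorted xs key) = PySem.List.sorted (firstOcc [] xs) key := by
  induction xs using List.reverseRecOn with
  | nil => rfl
  | append_singleton xs x ih =>
    set bef : List Int → List Int → Bool := fun a b => decide (key a < key b) with hbef
    set S := PySem.List.sorted xs key with hS
    set P := S.takeWhile (fun y => ! bef x y) with hP
    set R := S.dropWhile (fun y => ! bef x y) with hR
    have hPR : P ++ R = S := List.takeWhile_append_dropWhile
    have hsplit : PySem.List.sorted (xs ++ [x]) key = P ++ x :: R := by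
      rw [sorted_snoc, insertBy_eq_takeWhile]
    have hPle : ∀ y ∈ P, ¬ (key x < key y) := by
      intro y hy
      have := List.mem_takeWhile_imp (hP ▸ hy)
      simpa [hbef] using this
    have hRgt : ∀ y ∈ R, key x < key y := by
      intro y hy
      have hpw : R.Pairwise (fun a b => key a ≤ key b) :=
        (PySem.List.sorted_pairwise xs key).sublist (hS ▸ hR ▸ List.dropWhile_sublist _)
      cases hRc : R with
      | nil => simp [hRc] at hy
      | cons r R' =>
        have hhead : bef x r = true := by
          have := List.head?_dropWhile_not (fun y => ! bef x y) S
          rw [← hR, hRc] at this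
          simpa using this
        have hxr : key x < key r := by simpa [hbef] using hhead
        rw [hRc] at hy
        rcases List.mem_cons.mp hy with rfl | hy'
        · exact hxr
        · rw [hRc] at hpw
          exact lt_of_lt_of_le hxr ((List.pairwise_cons.mp hpw).1 y hy')
    rw [hsplit]
    have happ : firstOcc [] (P ++ x :: R) = firstOcc [] P ++ firstOcc P (x :: R) := by
      rw [firstOcc_append]; simp
    by_cases hx : x ∈ xs
    · -- duplicate: the old occurrence of x sits in P, dedup is unchanged
      have hxS : x ∈ S := (PySem.List.mem_sorted xs key false x).mpr hx
      have hxP : x ∈ P := by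
        rcases List.mem_append.mp (hPR ▸ hxS) with h | h
        · exact h
        · exact absurd (hRgt x h) (lt_irrefl _)
      rw [happ]
      have h1 : firstOcc P (x :: R) = firstOcc (P ++ []) R := by
        rw [List.append_nil]; simp [firstOcc, hxP]
      rw [h1, ← firstOcc_append, hPR]
      have hrhs : firstOcc [] (xs ++ [x]) = firstOcc [] xs := by
        rw [firstOcc_append]
        simp [firstOcc, hx]
      rw [hrhs, ← ih]
    · -- fresh element: it lands between the small and large keys of the deduped list too
      have hxS : x ∉ S := fun h => hx ((PySem.List.mem_sorted xs key false x).mp h)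
      have hxP : x ∉ P := fun h => hxS (hPR ▸ List.mem_append_left _ h)
      have hxR : x ∉ R := fun h => hxS (hPR ▸ List.mem_append_right _ h)
      have hrhs : firstOcc [] (xs ++ [x]) = firstOcc [] xs ++ [x] := by
        rw [firstOcc_append]
        simp [firstOcc, hx]
      rw [happ, hrhs, sorted_snoc, ← ih]
      have hPdecomp : firstOcc [] S = firstOcc [] P ++ firstOcc P R := by
        rw [← hPR, firstOcc_append]; simp
      rw [hPdecomp, ← hbef, insertBy_middle bef x _ _
        (fun y hy => by
          have hyP : y ∈ P := mem_firstOcc _ _ _ hy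
          simpa [hbef] using hPle y hyP)
        (fun y hy => by
          have hyR : y ∈ R := mem_firstOcc _ _ _ hy
          simpa [hbef] using hRgt y hyR)]
      have : firstOcc P (x :: R) = x :: firstOcc P R := by
        rw [firstOcc]
        rw [if_neg hxP]
        refine congrArg _ (firstOcc_congr _ _ _ (fun y hy => ?_))
        have hyR : y ∈ R := hy
        simp only [List.mem_cons]
        constructor
        · rintro (rfl | h)
          · exact absurd hyR hxR
          · exact h
        · intro h; exact Or.inr h
      rw [this]

-- A's loop computes firstOcc
theorem loopA_eq_firstOcc (l : List (List Int)) :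
    ∀ (seen d : List (List Int)),
      (l.foldl (fun (st : PySem.Set (List Int) × List (List Int)) item =>
          if st.1.contains item then st else (st.1.add item, st.2 ++ [item])) (seen, d)).2
        = d ++ firstOcc seen l := by
  induction l with
  | nil => intro seen d; simp [firstOcc]
  | cons x xs ih =>
    intro seen d
    simp only [List.foldl_cons]
    by_cases hmem : x ∈ seen
    · have hc : PySem.Set.contains seen x = true := by
        simpa [PySem.Set.contains] using hmem
      rw [if_pos hc, ih, firstOcc, if_pos hmem]
    · have hc : PySem.Set.contains seen x = false := by
        simpa [PySem.Set.contains] using hmem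
      rw [hc]
      simp only [Bool.false_eq_true, if_false]
      have hadd : PySem.Set.add seen x = seen ++ [x] := by
        simp [PySem.Set.add, hmem]
      rw [hadd, ih, firstOcc, if_neg hmem]
      rw [firstOcc_congr xs (seen ++ [x]) (x :: seen) (fun y _ => by
        simp only [List.mem_append, List.mem_cons]; tauto)]
      simp

-- B's dict loop computes firstOcc on the values (all stored pairs are (k, k))
theorem loopB_eq_firstOcc (l : List (List Int)) :
    ∀ (d : PySem.Dict (List Int) (List Int)), (∀ p ∈ d.items, p.2 = p.1) →
      (l.foldl (fun d item => d.insert item item) d).items.map Prod.snd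
        = d.items.map Prod.snd ++ firstOcc (d.items.map Prod.fst) l := by
  induction l with
  | nil => intro d _; simp [firstOcc]
  | cons x xs ih =>
    intro d hd
    simp only [List.foldl_cons]
    by_cases hmem : x ∈ d.items.map Prod.fst
    · have hc : d.contains x = true := by
        rcases List.mem_map.mp hmem with ⟨p, hp, hpx⟩
        exact List.any_eq_true.mpr ⟨p, hp, by simp [hpx]⟩
      have hins : d.insert x x = d := by
        simp only [PySem.Dict.insert, hc, if_true]
        cases d with
        | mk items =>
          simp only [PySem.Dict.mk.injEq]
          have hmap : ∀ p ∈ items, (if p.1 == x then (x, x) else p) = id p := by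
            intro p hp
            by_cases hpk : p.1 = x
            · have hv := hd p hp
              obtain ⟨a, b⟩ := p
              simp only at hpk hv
              subst hv; subst hpk
              simp [id]
            · simp [hpk, id]
          rw [List.map_congr_left hmap, List.map_id]
      rw [hins, ih d hd, firstOcc, if_pos hmem]
    · have hc : d.contains x = false := by
        refine List.any_eq_false.mpr (fun p hp => ?_)
        simp only [beq_iff_eq]
        intro hpk
        exact hmem (List.mem_map.mpr ⟨p, hp, hpk⟩)
      have hins : d.insert x x = ⟨d.items ++ [(x, x)]⟩ := by
        simp [PySem.Dict.insert, hc]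
      rw [hins, ih ⟨d.items ++ [(x, x)]⟩ (by
        intro p hp
        rcases List.mem_append.mp hp with h | h
        · exact hd p h
        · simp at h; simp [h])]
      simp only [List.map_append, List.map_cons, List.map_nil]
      rw [firstOcc, if_neg hmem]
      rw [firstOcc_congr xs (d.items.map Prod.fst ++ [x]) (x :: d.items.map Prod.fst)
        (fun y _ => by simp only [List.mem_append, List.mem_cons]; tauto)]
      simp

-- ===== VERDICT (by name: the statement is the Claim_ definition above) =====
theorem deduplicate_ordered_list_spec : Claim_equal_deduplicate_ordered_list := by
  intro lst _ _
  unfold Spec_deduplicate_ordered_list deduplicate_ordered_list deduplicate_ordered_list_alt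
  rw [loopA_eq_firstOcc]
  have hv : ∀ (d : PySem.Dict (List Int) (List Int)), PySem.Dict.values d = d.items.map Prod.snd :=
    fun _ => rfl
  have hB := loopB_eq_firstOcc lst PySem.Dict.empty (by simp [PySem.Dict.empty])
  rw [hv]
  simp only [PySem.Dict.empty] at hB ⊢
  simp only [List.map_nil, List.nil_append] at hB
  rw [hB]
  simpa using firstOcc_sorted_comm pvKey lst
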